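-- pv_equiv track=rewrite | github.com/pytorch/pytorch | .venv311/lib/python3.11/site-packages/sympy/tensor/array/expressions/from_array_to_matrix.py | _combine_removed
-- ===== SOURCE A (Python) =====
-- def _combine_removed(dim: int, removed1: list[int], removed2: list[int]) -> list[int]:
--     # Concatenate two axis removal operations as performed by
--     # _remove_trivial_dims,
--     removed1 = sorted(removed1)
--     removed2 = sorted(removed2)
--     i = 0
--     j = 0
--     removed = []
--     while True:
--         if j >= len(removed2):
--             while i < len(removed1):
--                 removed.append(removed1[i])
--                 i += 1
--             break
--         elif i < len(removed1) and removed1[i] <= i + removed2[j]: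
--             removed.append(removed1[i])
--             i += 1
--         else:
--             removed.append(i + removed2[j])
--             j += 1
--     return removed
-- ===== SOURCE B (Python) =====
-- def _combine_removed(dim: int, removed1: list[int], removed2: list[int]) -> list[int]:
--     r1 = sorted(removed1)
--     mapped = []
--     i = 0
--     for v in sorted(removed2):
--         while i < len(r1) and r1[i] <= v + i:
--             i += 1
--         mapped.append(v + i)
--     return sorted(r1 + mapped)
-- ===== Notes on version B (the rewrite author's own statement) =====
-- stated objective: alternative
-- what changed: Replaces A's interleaved two-pointer merge loop by a two-phase decomposition: one sweep maps each sorted removed2 value to its original coordinate via an advancing pointer/offset into sorted removed1, then the union of removed1 and the mapped values is sorted.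
import Mathlib
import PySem

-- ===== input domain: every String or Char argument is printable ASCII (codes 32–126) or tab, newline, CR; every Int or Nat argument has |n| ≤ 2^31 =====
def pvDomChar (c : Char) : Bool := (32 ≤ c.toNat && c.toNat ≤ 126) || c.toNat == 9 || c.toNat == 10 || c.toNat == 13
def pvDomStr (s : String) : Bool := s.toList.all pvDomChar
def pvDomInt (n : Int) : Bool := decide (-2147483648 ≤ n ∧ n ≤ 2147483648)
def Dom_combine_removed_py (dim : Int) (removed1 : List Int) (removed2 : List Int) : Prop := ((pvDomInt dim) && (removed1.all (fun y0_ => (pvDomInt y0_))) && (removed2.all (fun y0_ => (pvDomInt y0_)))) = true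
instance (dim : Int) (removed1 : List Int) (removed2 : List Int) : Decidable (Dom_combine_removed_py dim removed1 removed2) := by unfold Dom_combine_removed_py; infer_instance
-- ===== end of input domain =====

-- B replaces A's interleaved two-pointer merge by first mapping each removed2
-- value to its original coordinate in one sweep and then sorting the union
-- (objective: alternative decomposition, same asymptotic cost).

-- ===== PORT A =====
-- A's while-loop over indices i, j: here the already-consumed prefixes are
-- dropped, so `l1`/`l2` are the remaining suffixes and `i` counts consumed
-- removed1 elements (= Python's i); branch order as in A.
def combineGoA (l1 l2 : List Int) (i : Int) : List Int :=
  match l2 with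
  | [] => l1                                   -- j >= len: flush the rest of removed1
  | y :: ys =>
    match l1 with
    | x :: xs =>
      if x ≤ i + y then x :: combineGoA xs (y :: ys) (i + 1)
      else (i + y) :: combineGoA (x :: xs) ys i
    | [] => (i + y) :: combineGoA [] ys i

def combine_removed_py (dim : Int) (removed1 : List Int) (removed2 : List Int) : List Int :=
  combineGoA (PySem.List.sorted removed1 (fun x => x) false)
             (PySem.List.sorted removed2 (fun x => x) false) 0

-- ===== PORT B =====
-- the inner `while i < len(r1) and r1[i] <= v + i` loop: returns the remaining
-- suffix of r1 and the advanced counter i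
def combineAdvB (l1 : List Int) (i : Int) (v : Int) : List Int × Int :=
  match l1 with
  | [] => ([], i)
  | x :: xs => if x ≤ v + i then combineAdvB xs (i + 1) v else (x :: xs, i)

-- the `for v in sorted(removed2)` loop building `mapped`
def combineMapB (l1 : List Int) (i : Int) (l2 : List Int) : List Int :=
  match l2 with
  | [] => []
  | v :: vs =>
    let p := combineAdvB l1 i v
    (v + p.2) :: combineMapB p.1 p.2 vs

def combine_removed_py_alt (dim : Int) (removed1 : List Int) (removed2 : List Int) : List Int :=
  let r1 := PySem.List.sorted removed1 (fun x => x) false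
  let mapped := combineMapB r1 0 (PySem.List.sorted removed2 (fun x => x) false)
  PySem.List.sorted (r1 ++ mapped) (fun x => x) false

-- ===== PRECONDITION & SPEC =====
def Spec_combine_removed_py (dim : Int) (removed1 : List Int) (removed2 : List Int) (out : List Int) : Prop := out = combine_removed_py_alt dim removed1 removed2
instance (dim : Int) (removed1 : List Int) (removed2 : List Int) (out : List Int) : Decidable (Spec_combine_removed_py dim removed1 removed2 out) := by unfold Spec_combine_removed_py; infer_instance

-- ===== CLAIM (what is proved, stated in full; the proofs are below) =====
def Claim_equal_combine_removed_py : Prop := ∀ (dim : Int) (removed1 : List Int) (removed2 : List Int), Dom_combine_removed_py dim removed1 removed2 → Spec_combine_removed_py dim removed1 removed2 (combine_removed_py dim removed1 removed2)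

-- ===== LEMMAS AND PROOFS =====

-- B's mapper absorbs a taken element of l1 exactly like A's take branch
theorem combineMapB_cons_take (x : Int) (xs : List Int) (i y : Int) (ys : List Int)
    (h : x ≤ i + y) :
    combineMapB (x :: xs) i (y :: ys) = combineMapB xs (i + 1) (y :: ys) := by
  simp [combineMapB, combineAdvB, show x ≤ y + i by omega]

theorem combineMapB_cons_skip (l1 : List Int) (i y : Int) (ys : List Int)
    (h : ∀ x, l1.head? = some x → ¬ x ≤ i + y) :
    combineMapB l1 i (y :: ys) = (y + i) :: combineMapB l1 i ys := by
  cases l1 with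
  | nil => simp [combineMapB, combineAdvB]
  | cons x xs =>
    have := h x rfl
    simp [combineMapB, combineAdvB, show ¬ x ≤ y + i by omega]

-- A's merge is a permutation of l1 ++ B's mapped values
theorem combineGoA_perm (l1 l2 : List Int) (i : Int) :
    (combineGoA l1 l2 i).Perm (l1 ++ combineMapB l1 i l2) := by
  induction l1, l2, i using combineGoA.induct with
  | case1 l1 i => simp [combineGoA, combineMapB]
  | case2 i y ys x xs h ih =>
    rw [combineGoA, if_pos h, combineMapB_cons_take x xs i y ys h]
    simpa using ih.cons x
  | case3 i y ys x xs h ih =>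
    rw [combineGoA, if_neg h, combineMapB_cons_skip (x :: xs) i y ys (by simpa using h)]
    have h2 : ((i + y) :: ((x :: xs) ++ combineMapB (x :: xs) i ys)).Perm
        ((x :: xs) ++ (y + i) :: combineMapB (x :: xs) i ys) := by
      have := (List.perm_middle (a := i + y) (l₁ := (x :: xs))
        (l₂ := combineMapB (x :: xs) i ys)).symm
      simpa [Int.add_comm i y] using this
    exact (ih.cons (i + y)).trans h2
  | case4 i y ys ih =>
    rw [combineGoA, combineMapB_cons_skip [] i y ys (by simp)]
    simpa [Int.add_comm i y] using ih.cons (i + y)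

-- lower bound propagates through A's merge
theorem combineGoA_lb (c : Int) (l1 l2 : List Int) (i : Int)
    (h1 : ∀ x ∈ l1, c ≤ x) (h2 : ∀ y ∈ l2, c ≤ i + y) :
    ∀ z ∈ combineGoA l1 l2 i, c ≤ z := by
  induction l1, l2, i using combineGoA.induct with
  | case1 l1 i => simpa [combineGoA] using h1
  | case2 i y ys x xs h ih =>
    rw [combineGoA, if_pos h]
    intro z hz
    rcases List.mem_cons.mp hz with rfl | hz
    · exact h1 z (by simp)
    · exact ih (fun a ha => h1 a (by simp [ha])) (fun a ha => by have := h2 a ha; omega) z hz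
  | case3 i y ys x xs h ih =>
    rw [combineGoA, if_neg h]
    intro z hz
    rcases List.mem_cons.mp hz with rfl | hz
    · exact h2 y (by simp)
    · exact ih h1 (fun a ha => h2 a (by simp [ha])) z hz
  | case4 i y ys ih =>
    rw [combineGoA]
    intro z hz
    rcases List.mem_cons.mp hz with rfl | hz
    · exact h2 y (by simp)
    · exact ih (by simp) (fun a ha => h2 a (by simp [ha])) z hz

-- A's output is nondecreasing when both inputs are sorted
theorem combineGoA_pairwise (l1 l2 : List Int) (i : Int)
    (h1 : l1.Pairwise (· ≤ ·)) (h2 : l2.Pairwise (· ≤ ·)) :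
    (combineGoA l1 l2 i).Pairwise (· ≤ ·) := by
  induction l1, l2, i using combineGoA.induct with
  | case1 l1 i => simpa [combineGoA] using h1
  | case2 i y ys x xs h ih =>
    rw [combineGoA, if_pos h]
    have hx : ∀ z ∈ combineGoA xs (y :: ys) (i + 1), x ≤ z := by
      refine combineGoA_lb x xs (y :: ys) (i + 1) ?_ ?_
      · exact fun a ha => (List.pairwise_cons.mp h1).1 a ha
      · intro a ha
        rcases List.mem_cons.mp ha with rfl | ha
        · omega
        · have := (List.pairwise_cons.mp h2).1 a ha; omega
    exact List.pairwise_cons.mpr ⟨hx, ih (List.pairwise_cons.mp h1).2 h2⟩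
  | case3 i y ys x xs h ih =>
    rw [combineGoA, if_neg h]
    have hx : ∀ z ∈ combineGoA (x :: xs) ys i, i + y ≤ z := by
      refine combineGoA_lb (i + y) (x :: xs) ys i ?_ ?_
      · intro a ha
        rcases List.mem_cons.mp ha with rfl | ha
        · omega
        · have := (List.pairwise_cons.mp h1).1 a ha; omega
      · intro a ha
        have := (List.pairwise_cons.mp h2).1 a ha; omega
    exact List.pairwise_cons.mpr ⟨hx, ih h1 (List.pairwise_cons.mp h2).2⟩
  | case4 i y ys ih =>
    rw [combineGoA]
    have hx : ∀ z ∈ combineGoA [] ys i, i + y ≤ z := by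
      refine combineGoA_lb (i + y) [] ys i (by simp) ?_
      intro a ha
      have := (List.pairwise_cons.mp h2).1 a ha; omega
    exact List.pairwise_cons.mpr ⟨hx, ih (by simp) (List.pairwise_cons.mp h2).2⟩

-- ===== VERDICT (by name: the statement is the Claim_ definition above) =====
theorem combine_removed_py_spec : Claim_equal_combine_removed_py := by
  intro dim removed1 removed2 _
  show combine_removed_py dim removed1 removed2 = combine_removed_py_alt dim removed1 removed2
  unfold combine_removed_py combine_removed_py_alt
  set l1 := PySem.List.sorted removed1 (fun x => x) false with hl1
  set l2 := PySem.List.sorted removed2 (fun x => x) false with hl2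
  have h1 : l1.Pairwise (· ≤ ·) := by
    simpa using PySem.List.sorted_pairwise (xs := removed1) (key := fun x => x)
  have h2 : l2.Pairwise (· ≤ ·) := by
    simpa using PySem.List.sorted_pairwise (xs := removed2) (key := fun x => x)
  exact (PySem.List.sorted_id_eq_of_perm_of_pairwise _ _
    (combineGoA_perm l1 l2 0) (combineGoA_pairwise l1 l2 0 h1 h2)).symm
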